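-- pv_equiv track=rewrite | github.com/ChadDiaz/CSPT21-1.1-Python-I | codeSig.py | csSquareAllDigits
-- ===== SOURCE A (Python) =====
-- def csSquareAllDigits(n):
--     string = ""
--
--     res = [int(x) for x in str(n)]
--
--     for number in res:
--         squared = (number ** 2)
--         newString = str(squared)
--         string += newString
--
--     return int(string)
-- ===== SOURCE B (Python) =====
-- def csSquareAllDigits(n):
--     # Place-value arithmetic: extract digits of n arithmetically (no string building),
--     # square each, and append each square to an integer accumulator by multiply-add.
--     if n == 0:
--         return 0
--     digits = []
--     m = n
--     while m > 0:
--         digits.append(m % 10)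
--         m //= 10
--     acc = 0
--     for d in reversed(digits):
--         s = d * d
--         acc = acc * (10 if s < 10 else 100) + s
--     return acc
-- ===== Notes on version B (the rewrite author's own statement) =====
-- stated objective: alternative
-- what changed: B extracts digits by arithmetic (mod/div) instead of str(n), and combines the squared digits into an integer accumulator by base-10 multiply-add instead of concatenating their decimal strings and parsing the result with int().
import Mathlib
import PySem

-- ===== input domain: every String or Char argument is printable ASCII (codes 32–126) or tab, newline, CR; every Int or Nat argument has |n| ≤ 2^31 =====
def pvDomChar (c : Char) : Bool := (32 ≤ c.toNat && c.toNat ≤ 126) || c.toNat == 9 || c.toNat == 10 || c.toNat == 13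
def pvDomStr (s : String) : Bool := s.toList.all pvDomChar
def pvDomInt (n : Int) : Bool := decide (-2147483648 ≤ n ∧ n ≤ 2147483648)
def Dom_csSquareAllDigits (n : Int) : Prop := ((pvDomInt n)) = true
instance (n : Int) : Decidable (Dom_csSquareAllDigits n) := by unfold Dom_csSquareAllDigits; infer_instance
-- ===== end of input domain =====

-- B replaces A's string-building (concatenate str(d**2), then int(...)) by pure
-- place-value integer arithmetic on digits extracted with mod/div (objective: alternative).

-- ===== PORT A =====
-- `int(s)` ported by hand (PySem.Int.ofStr?'s parsing loop is private to the prelude, so its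
-- equations are unavailable to proofs): pvInt? is exact for the strings this program ever parses —
-- runs of ASCII digits (here: single chars of str(n) and the built string, both all-digits for
-- n ≥ 0) — returning the base-10 value; `none` = ValueError otherwise (e.g. int('-') when n < 0,
-- excluded by Pre_csSquareAllDigits).
def pvChFold (acc : Nat) (c : Char) : Nat := acc * 10 + (c.toNat - '0'.toNat)

def pvInt? (cs : List Char) : Option Int :=
  if cs ≠ [] ∧ cs.all Char.isDigit then some ((cs.foldl pvChFold 0 : Nat) : Int) else none

-- string grown by Python `+=` is ported as a `List Char` accumulator (PySem.Chars side);
-- the `.getD 0` after pvInt? is only reachable where Python raises ValueError (n < 0).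
def csSquareAllDigits (n : Int) : Int :=
  let res : List Int :=
    (PySem.Int.toStr n).toList.map (fun x => (pvInt? [x]).getD 0)
  let string : List Char :=
    res.foldl (fun string number =>
      let squared := number ^ 2
      let newString := PySem.Int.toChars squared
      string ++ newString) []
  (pvInt? string).getD 0

-- ===== PORT B =====
-- `while m > 0: digits.append(m % 10); m //= 10` (m stays ≥ 0, so // and % agree with Nat / and %)
def pvDigitsRev (m : Nat) : List Nat :=
  if m = 0 then [] else m % 10 :: pvDigitsRev (m / 10)
decreasing_by exact Nat.div_lt_self (Nat.pos_of_ne_zero (by assumption)) (by omega)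

def csSquareAllDigits_alt (n : Int) : Int :=
  if n = 0 then 0
  else
    let digits := pvDigitsRev n.toNat
    digits.reverse.foldl (fun (acc : Int) (d : Nat) =>
      let s : Int := (d : Int) * (d : Int)
      acc * (if s < 10 then 10 else 100) + s) 0

-- ===== PRECONDITION & SPEC =====
-- A raises ValueError on n < 0 (int('-') in the comprehension over str(n)), so Pre_ excludes negatives.
def Pre_csSquareAllDigits (n : Int) : Prop := 0 ≤ n
instance (n : Int) : Decidable (Pre_csSquareAllDigits n) := by unfold Pre_csSquareAllDigits; infer_instance

def pvWitness_csSquareAllDigits : Int := 105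

def Spec_csSquareAllDigits (n : Int) (out : Int) : Prop := out = csSquareAllDigits_alt n
instance (n : Int) (out : Int) : Decidable (Spec_csSquareAllDigits n out) := by unfold Spec_csSquareAllDigits; infer_instance

-- ===== CLAIM (what is proved, stated in full; the proofs are below) =====
def Claim_equal_csSquareAllDigits : Prop := ∀ (n : Int), Dom_csSquareAllDigits n → Pre_csSquareAllDigits n → Spec_csSquareAllDigits n (csSquareAllDigits n)

-- ===== LEMMAS AND PROOFS =====

def pvSqAcc (acc : Nat) (d : Nat) : Nat := acc * (if d * d < 10 then 10 else 100) + d * d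

theorem pv_digitChar_toNat {d : Nat} (h : d < 10) : (Nat.digitChar d).toNat - '0'.toNat = d := by
  interval_cases d <;> decide

theorem pv_digitChar_isDigit {d : Nat} (h : d < 10) : (Nat.digitChar d).isDigit = true := by
  interval_cases d <;> decide

theorem pv_foldD (v : Nat) : ∀ acc : Nat,
    (Nat.toDigits 10 v).foldl pvChFold acc = acc * 10 ^ (Nat.toDigits 10 v).length + v := by
  induction v using Nat.strong_induction_on with
  | _ v ih =>
    intro acc
    by_cases h : v < 10
    · rw [Nat.toDigits_of_lt_base h]
      simp only [List.foldl_cons, List.foldl_nil, List.length_cons, List.length_nil,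
        pvChFold, pv_digitChar_toNat h]
      simp
    · rw [Nat.toDigits_of_base_le (by norm_num) (by omega), List.foldl_append]
      rw [ih (v / 10) (by omega) acc]
      simp only [List.foldl_cons, List.foldl_nil, List.length_append, List.length_cons,
        List.length_nil]
      have hm : v % 10 < 10 := Nat.mod_lt _ (by norm_num)
      simp only [pvChFold, pv_digitChar_toNat hm]
      have h2 : 10 * (v / 10) + v % 10 = v := Nat.div_add_mod v 10
      ring_nf
      omega

theorem pv_toDigits_digit {v : Nat} {c : Char} (hc : c ∈ Nat.toDigits 10 v) :
    c.isDigit = true :=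
  Nat.isDigit_of_mem_toDigits (by norm_num) (by norm_num) hc

theorem pv_toDigits_ne_nil (v : Nat) : Nat.toDigits 10 v ≠ [] := by
  have := Nat.length_toDigits_pos (b := 10) (n := v)
  intro h; rw [h] at this; simp at this

-- int() round-trip on canonical decimal strings
theorem pv_roundtrip (v : Nat) : pvInt? (Nat.toDigits 10 v) = some (v : Int) := by
  unfold pvInt?
  rw [if_pos ⟨pv_toDigits_ne_nil v, List.all_eq_true.mpr (fun c hc => pv_toDigits_digit hc)⟩]
  rw [pv_foldD v 0]
  simp

theorem pv_single_char {c : Char} (hc : c.isDigit = true) :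
    pvInt? [c] = some ((c.toNat - '0'.toNat : Nat) : Int) := by
  unfold pvInt?
  rw [if_pos ⟨by simp, by simp [hc]⟩]
  simp [pvChFold]

theorem pv_digitsRev_lt (m : Nat) : ∀ d ∈ pvDigitsRev m, d < 10 := by
  induction m using Nat.strong_induction_on with
  | _ m ih =>
    intro d hd
    rw [pvDigitsRev] at hd
    split at hd
    · simp at hd
    · rcases List.mem_cons.mp hd with h | h
      · subst h; exact Nat.mod_lt _ (by norm_num)
      · exact ih (m / 10) (Nat.div_lt_self (Nat.pos_of_ne_zero (by assumption)) (by omega)) d h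

theorem pv_toDigits_eq (m : Nat) (hm : 0 < m) :
    Nat.toDigits 10 m = ((pvDigitsRev m).reverse).map Nat.digitChar := by
  induction m using Nat.strong_induction_on with
  | _ m ih =>
    by_cases h : m < 10
    · rw [Nat.toDigits_of_lt_base h, pvDigitsRev]
      rw [if_neg (by omega), pvDigitsRev, if_pos (Nat.div_eq_of_lt h)]
      simp [Nat.mod_eq_of_lt h]
    · rw [Nat.toDigits_of_base_le (by norm_num) (by omega), pvDigitsRev, if_neg (by omega)]
      rw [ih (m / 10) (Nat.div_lt_self hm (by omega)) (by omega)]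
      simp

theorem pv_append_digits (a s : Nat) (ha : 0 < a) (hs : s < 100) :
    Nat.toDigits 10 a ++ Nat.toDigits 10 s
      = Nat.toDigits 10 (a * (if s < 10 then 10 else 100) + s) := by
  split
  · rename_i h
    rw [Nat.mul_comm a 10]
    exact Nat.toDigits_append_toDigits (by norm_num) ha h
  · rename_i h
    rw [not_lt] at h
    have h1 : s / 10 < 10 := by omega
    have h2 : 0 < s / 10 := by omega
    have h3 : s % 10 < 10 := Nat.mod_lt _ (by norm_num)
    have key : a * 100 + s = 10 * (10 * a + s / 10) + s % 10 := by omega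
    rw [key, ← Nat.toDigits_append_toDigits (b := 10) (by norm_num) (by omega) h3,
      ← Nat.toDigits_append_toDigits (b := 10) (by norm_num) ha h1,
      Nat.toDigits_of_base_le (b := 10) (by norm_num) h]
    simp [List.append_assoc, Nat.toDigits_of_lt_base h3]

theorem pv_core (m : Nat) (hm : 0 < m) :
    (((pvDigitsRev m).reverse.map (fun d => Nat.toDigits 10 (d * d))).flatten
        = Nat.toDigits 10 ((pvDigitsRev m).reverse.foldl pvSqAcc 0))
      ∧ 0 < (pvDigitsRev m).reverse.foldl pvSqAcc 0 := by
  induction m using Nat.strong_induction_on with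
  | _ m ih =>
    by_cases h : m < 10
    · rw [pvDigitsRev, if_neg (by omega), pvDigitsRev, if_pos (Nat.div_eq_of_lt h)]
      have hmod : m % 10 = m := Nat.mod_eq_of_lt h
      constructor
      · simp [pvSqAcc, hmod]
      · simp only [List.reverse_cons, List.reverse_nil, List.nil_append, List.foldl_cons,
          List.foldl_nil, pvSqAcc, hmod]
        positivity
    · rw [pvDigitsRev, if_neg (by omega)]
      have hrec := ih (m / 10) (Nat.div_lt_self hm (by omega)) (by omega)
      have hd : m % 10 < 10 := Nat.mod_lt _ (by norm_num)
      set prev := (pvDigitsRev (m / 10)).reverse with hprev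
      set a := prev.foldl pvSqAcc 0 with hacc
      simp only [List.reverse_cons, List.map_append, List.flatten_append, List.foldl_append,
        List.map_cons, List.map_nil, List.flatten_cons, List.flatten_nil, List.append_nil,
        List.foldl_cons, List.foldl_nil]
      rw [hrec.1]
      constructor
      · rw [show pvSqAcc a (m % 10) = a * (if m % 10 * (m % 10) < 10 then 10 else 100)
            + m % 10 * (m % 10) from rfl]
        exact pv_append_digits a (m % 10 * (m % 10)) hrec.2
          (lt_of_le_of_lt (Nat.mul_le_mul (by omega) (by omega) :
            m % 10 * (m % 10) ≤ 9 * 9) (by norm_num))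
      · have := hrec.2
        simp only [pvSqAcc]
        split <;> nlinarith

theorem pv_cast_fold (ds : List Nat) : ∀ acc : Nat,
    List.foldl (fun (acc : Int) (d : Nat) =>
      let s : Int := (d : Int) * (d : Int)
      acc * (if s < 10 then 10 else 100) + s) (acc : Int) ds
    = ((ds.foldl pvSqAcc acc : Nat) : Int) := by
  induction ds with
  | nil => intro acc; simp
  | cons d rest ih =>
    intro acc
    simp only [List.foldl_cons]
    have hstep : (let s : Int := (d : Int) * (d : Int)
        (acc : Int) * (if s < 10 then 10 else 100) + s) = ((pvSqAcc acc d : Nat) : Int) := by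
      simp only [pvSqAcc]
      by_cases hdd : d * d < 10
      · rw [if_pos (show ((d : Int)) * (d : Int) < 10 by exact_mod_cast hdd), if_pos hdd]
        push_cast; ring
      · rw [if_neg (show ¬ ((d : Int)) * (d : Int) < 10 by exact_mod_cast hdd), if_neg hdd]
        push_cast; ring
    rw [hstep, ih]

theorem pv_toChars_natCast (k : Nat) :
    PySem.Int.toChars (k : Int) = Nat.toDigits 10 k := by
  simp only [PySem.Int.toChars]
  rw [if_neg (not_lt.mpr (Int.natCast_nonneg k))]
  simp

-- A's per-character int(x) over the digit string of m, rewritten to the digit list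
theorem pv_res_eq (m : Nat) (hm : 0 < m) :
    (Nat.toDigits 10 m).map (fun x => (pvInt? [x]).getD 0)
      = (pvDigitsRev m).reverse.map Int.ofNat := by
  rw [pv_toDigits_eq m hm, List.map_map]
  apply List.map_congr_left
  intro d hd
  have hd10 : d < 10 := pv_digitsRev_lt m d (List.mem_reverse.mp hd)
  simp only [Function.comp_apply]
  rw [pv_single_char (pv_digitChar_isDigit hd10), pv_digitChar_toNat hd10]
  simp [Int.ofNat_eq_natCast]

-- ===== VERDICT (by name: the statement is the Claim_ definition above) =====
theorem csSquareAllDigits_spec : Claim_equal_csSquareAllDigits := by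
  intro n _ hpre
  unfold Spec_csSquareAllDigits
  by_cases hz : n = 0
  · subst hz; decide
  · obtain ⟨m, rfl⟩ : ∃ m : Nat, n = (m : Int) := ⟨n.toNat, (Int.toNat_of_nonneg hpre).symm⟩
    have hm : 0 < m := by
      rcases Nat.eq_zero_or_pos m with h | h
      · exfalso; exact hz (by simp [h])
      · exact h
    unfold csSquareAllDigits
    simp only [PySem.Int.toList_toStr, pv_toChars_natCast]
    rw [pv_res_eq m hm, List.foldl_map]
    have hpow : ∀ (s : List Char) (d : Nat),
        s ++ PySem.Int.toChars (Int.ofNat d ^ 2) = s ++ Nat.toDigits 10 (d * d) := by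
      intro s d
      have h1 : (Int.ofNat d) ^ 2 = ((d * d : Nat) : Int) := by
        rw [Int.ofNat_eq_natCast]; push_cast; ring
      rw [h1, pv_toChars_natCast]
    simp only [hpow]
    rw [PySem.List.foldl_append_eq_flatMap (fun d => Nat.toDigits 10 (d * d))
      ((pvDigitsRev m).reverse) [], List.nil_append, List.flatMap_def,
      (pv_core m hm).1, pv_roundtrip]
    unfold csSquareAllDigits_alt
    rw [if_neg hz]
    simp only [Int.toNat_natCast, Option.getD_some]
    exact (pv_cast_fold ((pvDigitsRev m).reverse) 0).symm
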